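-- pv_equiv track=rewrite | github.com/RuleIQ-Vercel-Deploy/ruleIQ | services/ai/assistant.py | _summarize_evidence_types
-- ===== SOURCE A (Python) =====
-- from typing import Any, AsyncIterator, Dict, List, Optional, Tuple
--
-- def _summarize_evidence_types(existing_evidence: List[Dict]) ->str:
--     """Summarize existing evidence types for context."""
--     if not existing_evidence:
--         return 'No evidence collected yet'
--     type_counts = {}
--     for item in existing_evidence:
--         evidence_type = item.get('evidence_type', 'unknown')
--         type_counts[evidence_type] = type_counts.get(evidence_type, 0) + 1
--     summary = []
--     for evidence_type, count in sorted(type_counts.items()):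
--         summary.append(f'- {evidence_type}: {count} items')
--     return '\n'.join(summary)
-- ===== SOURCE B (Python) =====
-- def _summarize_evidence_types(existing_evidence):
--     """Summarize existing evidence types for context."""
--     if not existing_evidence:
--         return 'No evidence collected yet'
--     keys = sorted(item.get('evidence_type', 'unknown') for item in existing_evidence)
--     lines = []
--     while keys:
--         head = keys[0]
--         n = 1
--         while n < len(keys) and keys[n] == head:
--             n += 1
--         lines.append(f'- {head}: {n} items')
--         keys = keys[n:]
--     return '\n'.join(lines)
-- ===== Notes on version B (the rewrite author's own statement) =====
-- stated objective: alternative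
-- what changed: Replaces the hash-map counting pass plus a separate sort of the (type,count) items by a single sort of the extracted type keys followed by one run-length grouping scan over the sorted keys.
import Mathlib
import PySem

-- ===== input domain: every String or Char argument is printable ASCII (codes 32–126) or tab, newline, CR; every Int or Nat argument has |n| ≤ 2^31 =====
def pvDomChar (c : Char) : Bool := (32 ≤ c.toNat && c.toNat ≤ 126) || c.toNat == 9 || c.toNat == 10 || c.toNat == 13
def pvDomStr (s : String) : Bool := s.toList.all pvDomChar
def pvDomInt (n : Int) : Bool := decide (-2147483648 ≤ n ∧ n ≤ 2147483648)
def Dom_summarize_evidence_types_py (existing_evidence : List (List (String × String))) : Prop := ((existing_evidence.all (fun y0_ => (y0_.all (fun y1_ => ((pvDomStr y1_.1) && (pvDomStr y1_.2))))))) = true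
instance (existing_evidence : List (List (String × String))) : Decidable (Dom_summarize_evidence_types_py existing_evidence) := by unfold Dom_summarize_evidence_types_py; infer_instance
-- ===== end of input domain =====

-- B replaces A's hash-map counting plus a separate sort of the items by one sort of the
-- extracted type keys followed by a single run-length grouping scan (alternative algorithm).

-- ===== PORT A =====
-- literal transliteration of A: guard, dict-counting loop, sorted(items) (tuple order), line loop, join
def summarize_evidence_types_py (existing_evidence : List (List (String × String))) : String :=
  if existing_evidence = [] then "No evidence collected yet"
  else
    let type_counts : PySem.Dict String Int :=
      existing_evidence.foldl (fun d item =>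
        let evidence_type := (PySem.Dict.mk item).getD "evidence_type" "unknown"
        d.insert evidence_type (d.getD evidence_type 0 + 1)) PySem.Dict.empty
    let summary :=
      (PySem.List.sorted2 type_counts.items Prod.fst Prod.snd false).map
        (fun p => "- " ++ p.1 ++ ": " ++ PySem.Int.toStr p.2 ++ " items")
    PySem.Str.join "\n" summary

-- ===== PORT B =====
-- inner while loop of Source B: count of the leading run of `k` and the remaining suffix
def pvRun (k : String) : List String → Nat × List String
  | [] => (0, [])
  | x :: t => if x == k then let p := pvRun k t; (p.1 + 1, p.2) else (0, x :: t)

lemma pvRun_len (k : String) : ∀ t : List String, (pvRun k t).2.length ≤ t.length := by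
  intro t
  induction t with
  | nil => simp [pvRun]
  | cons x t ih =>
      by_cases h : x == k
      · simp [pvRun, h]
        omega
      · simp [pvRun, h]

-- outer while loop of Source B over the sorted key list
def pvGroupLines : List String → List String
  | [] => []
  | k :: t =>
      let p := pvRun k t
      ("- " ++ k ++ ": " ++ PySem.Int.toStr (1 + (p.1 : Int)) ++ " items") :: pvGroupLines p.2
  termination_by l => l.length
  decreasing_by simpa using Nat.lt_succ_of_le (pvRun_len k t)

def summarize_evidence_types_py_alt (existing_evidence : List (List (String × String))) : String :=
  if existing_evidence = [] then "No evidence collected yet"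
  else
    let keys := PySem.List.sorted
      (existing_evidence.map (fun item => (PySem.Dict.mk item).getD "evidence_type" "unknown"))
      (fun k => k) false
    PySem.Str.join "\n" (pvGroupLines keys)

-- ===== PRECONDITION & SPEC =====
def Spec_summarize_evidence_types_py (existing_evidence : List (List (String × String))) (out : String) : Prop := out = summarize_evidence_types_py_alt existing_evidence
instance (existing_evidence : List (List (String × String))) (out : String) : Decidable (Spec_summarize_evidence_types_py existing_evidence out) := by unfold Spec_summarize_evidence_types_py; infer_instance

-- ===== CLAIM (what is proved, stated in full; the proofs are below) =====
def Claim_equal_summarize_evidence_types_py : Prop := ∀ (existing_evidence : List (List (String × String))), Dom_summarize_evidence_types_py existing_evidence → Spec_summarize_evidence_types_py existing_evidence (summarize_evidence_types_py existing_evidence)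

-- ===== LEMMAS AND PROOFS =====

def pvLine (k : String) (c : Int) : String := "- " ++ k ++ ": " ++ PySem.Int.toStr c ++ " items"

-- insertion-sort folds over two comparison functions that agree on the relevant elements agree
lemma insertBy_congr {α : Type} (f g : α → α → Bool) (x : α) :
    ∀ acc : List α, (∀ b ∈ acc, f x b = g x b) →
      PySem.List.insertBy f x acc = PySem.List.insertBy g x acc := by
  intro acc
  induction acc with
  | nil => intro _; rfl
  | cons y ys ih =>
      intro h
      have hy : f x y = g x y := h y (by simp)
      simp only [PySem.List.insertBy, hy]
      by_cases hg : g x y = true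
      · simp [hg]
      · simp [hg, ih (fun b hb => h b (by simp [hb]))]

lemma foldl_insertBy_congr {α : Type} (f g : α → α → Bool) (S : List α)
    (hfg : ∀ a ∈ S, ∀ b ∈ S, f a b = g a b) :
    ∀ (xs acc : List α), (∀ a ∈ xs, a ∈ S) → (∀ b ∈ acc, b ∈ S) →
      xs.foldl (fun acc x => PySem.List.insertBy f x acc) acc
        = xs.foldl (fun acc x => PySem.List.insertBy g x acc) acc := by
  intro xs
  induction xs with
  | nil => intro acc _ _; rfl
  | cons x t ih =>
      intro acc hxs hacc
      have hx : x ∈ S := hxs x (by simp)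
      simp only [List.foldl_cons]
      rw [insertBy_congr f g x acc (fun b hb => hfg x hx b (hacc b hb))]
      exact ih _ (fun a ha => hxs a (by simp [ha]))
        (fun b hb => by
          rcases (PySem.List.mem_insertBy _ _ _ _).1 hb with h | h
          · exact h ▸ hx
          · exact hacc b h)

-- sorting pairs with distinct first components by the (fst, snd) tuple key = sorting by fst
lemma sorted2_eq_sorted_fst (l : List (String × Int))
    (h : ∀ a ∈ l, ∀ b ∈ l, a.1 = b.1 → a = b) :
    PySem.List.sorted2 l Prod.fst Prod.snd false = PySem.List.sorted l Prod.fst false := by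
  show l.foldl (fun acc x => PySem.List.insertBy _ x acc) []
      = l.foldl (fun acc x => PySem.List.insertBy _ x acc) []
  apply foldl_insertBy_congr _ _ l _ l [] (fun a ha => ha) (by simp)
  intro a ha b hb
  by_cases hab : a.1 = b.1
  · have : a = b := h a ha b hb hab
    subst this
    simp
  · rcases lt_or_gt_of_ne hab with hlt | hgt
    · simp [hlt]
    · simp [not_lt_of_gt hgt, hgt]

lemma pvRun_spec (k : String) : ∀ t : List String, (k :: t).Pairwise (· ≤ ·) →
    t = List.replicate (pvRun k t).1 k ++ (pvRun k t).2 ∧ k ∉ (pvRun k t).2 := by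
  intro t
  induction t with
  | nil => intro _; simp [pvRun]
  | cons x t ih =>
      intro hp
      by_cases hx : x == k
      · have hxk : x = k := by simpa using hx
        subst hxk
        have hp' : (x :: t).Pairwise (· ≤ ·) := by
          rcases List.pairwise_cons.1 hp with ⟨h1, h2⟩
          exact List.pairwise_cons.2 ⟨fun y hy => h1 y (by simp [hy]), (List.pairwise_cons.1 h2).2⟩
        obtain ⟨heq, hnot⟩ := ih hp'
        constructor
        · simp only [pvRun, hx]
          simpa [List.replicate_succ] using congrArg (x :: ·) heq
        · simpa [pvRun, hx] using hnot
      · have hxk : x ≠ k := by simpa using hx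
        have hkx : k ≤ x := (List.pairwise_cons.1 hp).1 x (by simp)
        have hklt : k < x := lt_of_le_of_ne hkx (fun h => hxk h.symm)
        constructor
        · simp [pvRun, hx]
        · simp only [pvRun, hx]
          intro hk
          rcases List.mem_cons.1 (by simpa using hk) with h | h
          · exact hxk h.symm
          · have hxle : x ≤ k := (List.pairwise_cons.1 (List.pairwise_cons.1 hp).2).1 k h
            exact absurd hxle (not_le_of_gt hklt)

-- grouping a sorted list yields one line per distinct key, counted over the whole list
lemma pvGroupLines_sorted : ∀ s : List String, s.Pairwise (· ≤ ·) →
    pvGroupLines s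
      = (PySem.List.sorted (PySem.Set.ofList s) (fun x => x) false).map
          (fun k => pvLine k (s.count k : Int)) := by
  intro s
  induction s using pvGroupLines.induct with
  | case1 =>
      intro _
      rw [pvGroupLines]
      rfl
  | case2 k t p ih =>
      intro hp
      have ih2 : (pvRun k t).2.Pairwise (· ≤ ·) →
          pvGroupLines (pvRun k t).2
            = (PySem.List.sorted (PySem.Set.ofList (pvRun k t).2) (fun x => x) false).map
                (fun m => pvLine m ((pvRun k t).2.count m : Int)) := ih
      have hstep : pvGroupLines (k :: t)
          = pvLine k (1 + ((pvRun k t).1 : Int)) :: pvGroupLines (pvRun k t).2 := by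
        rw [pvGroupLines]
        rfl
      obtain ⟨heq, hknr⟩ := pvRun_spec k t hp
      rcases hpr : pvRun k t with ⟨n, r⟩
      rw [hpr] at heq hknr ih2 hstep
      simp only at heq hknr ih2 hstep
      have hrsub : r.Sublist (k :: t) := by
        refine List.Sublist.trans ?_ (List.sublist_cons_self k t)
        rw [heq]
        exact List.sublist_append_right _ _
      have hrp : r.Pairwise (· ≤ ·) := hp.sublist hrsub
      have ihr := ih2 hrp
      have hmem : ∀ x, x ∈ k :: t ↔ x = k ∨ x ∈ r := by
        intro x
        rw [List.mem_cons, heq]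
        simp only [List.mem_append, List.mem_replicate]
        tauto
      have hklt : ∀ m ∈ r, k < m := by
        intro m hm
        have hmt : m ∈ t := by rw [heq]; exact List.mem_append_right _ hm
        have hk : k ≤ m := (List.pairwise_cons.1 hp).1 m hmt
        exact lt_of_le_of_ne hk (fun h => hknr (h ▸ hm))
      have hsorted_eq : PySem.List.sorted (PySem.Set.ofList (k :: t)) (fun x => x) false
          = k :: PySem.List.sorted (PySem.Set.ofList r) (fun x => x) false := by
        apply PySem.List.sorted_eq_of_perm_of_pairwise_lt
        · apply (List.perm_ext_iff_of_nodup ?_ (PySem.Set.nodup_ofList _)).2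
          · intro a
            have hma := hmem a
            simp only [List.mem_cons] at hma
            simp only [PySem.Set.mem_ofList, PySem.List.mem_sorted, List.mem_cons]
            tauto
          · refine List.nodup_cons.2 ⟨?_, ?_⟩
            · intro hkin
              have : k ∈ r := by
                simpa [PySem.List.mem_sorted, PySem.Set.mem_ofList] using hkin
              exact hknr this
            · exact ((PySem.List.sorted_perm _ _ _).nodup_iff).2 (PySem.Set.nodup_ofList _)
        · refine List.pairwise_cons.2 ⟨?_, ?_⟩
          · intro m hm
            exact hklt m (by simpa [PySem.List.mem_sorted, PySem.Set.mem_ofList] using hm)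
          · exact PySem.List.sorted_ofList_pairwise_lt r
      have hck : (((k :: t).count k : Nat) : Int) = 1 + (n : Int) := by
        have h0 : r.count k = 0 := List.count_eq_zero.2 hknr
        have : (k :: t).count k = n + 1 := by
          rw [List.count_cons_self, heq, List.count_append, h0]
          simp
        rw [this]; push_cast; ring
      have hcr : ∀ m ∈ r, (k :: t).count m = r.count m := by
        intro m hm
        have hmk : m ≠ k := fun h => hknr (h ▸ hm)
        rw [heq]
        simp [List.count_append, List.count_replicate, Ne.symm hmk]
      calc pvGroupLines (k :: t)
          = pvLine k (1 + (n : Int)) :: pvGroupLines r := hstep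
        _ = pvLine k (1 + (n : Int))
              :: (PySem.List.sorted (PySem.Set.ofList r) (fun x => x) false).map
                  (fun m => pvLine m (r.count m : Int)) := by rw [ihr]
        _ = (PySem.List.sorted (PySem.Set.ofList (k :: t)) (fun x => x) false).map
              (fun m => pvLine m ((k :: t).count m : Int)) := by
            rw [hsorted_eq, List.map_cons, hck]
            congr 1
            apply List.map_congr_left
            intro m hm
            rw [hcr m (by simpa [PySem.List.mem_sorted, PySem.Set.mem_ofList] using hm)]

-- ===== VERDICT (by name: the statement is the Claim_ definition above) =====
theorem summarize_evidence_types_py_spec : Claim_equal_summarize_evidence_types_py := by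
  intro xs _
  unfold Spec_summarize_evidence_types_py
  by_cases hxs : xs = []
  · simp [summarize_evidence_types_py, summarize_evidence_types_py_alt, hxs]
  · have hA : summarize_evidence_types_py xs
        = PySem.Str.join "\n"
            ((PySem.List.sorted
                (PySem.Set.ofList (xs.map (fun item => (PySem.Dict.mk item).getD "evidence_type" "unknown")))
                (fun x => x) false).map
              (fun k => pvLine k ((xs.map (fun item => (PySem.Dict.mk item).getD "evidence_type" "unknown")).count k : Int))) := by
      simp only [summarize_evidence_types_py, if_neg hxs]
      have h1 : xs.foldl (fun d item =>
            let evidence_type := (PySem.Dict.mk item).getD "evidence_type" "unknown"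
            d.insert evidence_type (d.getD evidence_type 0 + 1)) PySem.Dict.empty
          = PySem.Dict.counter (xs.map (fun item => (PySem.Dict.mk item).getD "evidence_type" "unknown")) := by
        rw [← PySem.Dict.foldl_insert_getD_add_one_eq_counter]
        exact (@List.foldl_map (List (String × String)) String (PySem.Dict String Int)
          (fun item => (PySem.Dict.mk item).getD "evidence_type" "unknown")
          (fun d x => d.insert x (d.getD x 0 + 1)) xs PySem.Dict.empty).symm
      rw [h1, PySem.Dict.items_counter]
      rw [sorted2_eq_sorted_fst]
      · rw [PySem.List.sorted_eq_of_perm_of_pairwise_lt _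
            ((PySem.List.sorted
                (PySem.Set.ofList (xs.map (fun item => (PySem.Dict.mk item).getD "evidence_type" "unknown")))
                (fun x => x) false).map
              (fun k => (k, ((xs.map (fun item => (PySem.Dict.mk item).getD "evidence_type" "unknown")).count k : Int))))
            Prod.fst
            ((PySem.List.sorted_perm _ _ _).map _)
            (List.Pairwise.map _ (fun a b h => h) (PySem.List.sorted_ofList_pairwise_lt _))]
        rw [List.map_map]
        rfl
      · intro a ha b hb hab
        obtain ⟨ka, hka, rfl⟩ := List.mem_map.1 ha
        obtain ⟨kb, hkb, rfl⟩ := List.mem_map.1 hb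
        simp only at hab
        subst hab
        rfl
    have hcnt : ∀ m : String,
        (((PySem.List.sorted (xs.map (fun item => (PySem.Dict.mk item).getD "evidence_type" "unknown")) (fun k => k) false).count m : Nat) : Int)
          = ((xs.map (fun item => (PySem.Dict.mk item).getD "evidence_type" "unknown")).count m : Int) := by
      intro m
      rw [List.Perm.count_eq (PySem.List.sorted_perm _ _ _) m]
    have hB : summarize_evidence_types_py_alt xs
        = PySem.Str.join "\n"
            ((PySem.List.sorted
                (PySem.Set.ofList (xs.map (fun item => (PySem.Dict.mk item).getD "evidence_type" "unknown")))
                (fun x => x) false).map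
              (fun k => pvLine k ((xs.map (fun item => (PySem.Dict.mk item).getD "evidence_type" "unknown")).count k : Int))) := by
      simp only [summarize_evidence_types_py_alt, if_neg hxs]
      rw [pvGroupLines_sorted _ (PySem.List.sorted_pairwise _ (fun k => k))]
      have hof : PySem.List.sorted
            (PySem.Set.ofList (PySem.List.sorted (xs.map (fun item => (PySem.Dict.mk item).getD "evidence_type" "unknown")) (fun k => k) false))
            (fun x => x) false
          = PySem.List.sorted
            (PySem.Set.ofList (xs.map (fun item => (PySem.Dict.mk item).getD "evidence_type" "unknown")))
            (fun x => x) false := by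
        apply PySem.List.sorted_eq_sorted_of_perm _ _ _ (fun a b h => h)
        apply (List.perm_ext_iff_of_nodup (PySem.Set.nodup_ofList _) (PySem.Set.nodup_ofList _)).2
        intro a
        simp [PySem.Set.mem_ofList, PySem.List.mem_sorted]
      rw [hof]
      simp only [hcnt]
    rw [hA, hB]
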